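-- pv_equiv track=rewrite | github.com/chriscastille6/SONA-System | apps/studies/irb_utils.py | get_college_from_department
-- ===== SOURCE A (Python) =====
-- def get_college_from_department(department):
--     """
--     Map department name to college code.
--
--     Args:
--         department: Department name from user profile
--
--     Returns:
--         College code or None
--     """
--     if not department:
--         return None
--
--     department_lower = department.lower()
--
--     # College of Business Administration
--     # Includes: Business, Accounting, Finance, Marketing, Management (including "Management and Marketing")
--     if any(term in department_lower for term in ['business', 'accounting', 'finance', 'marketing', 'management', 'economics']):
--         return 'business'
--
--     # College of Education and Behavioral Sciences
--     if any(term in department_lower for term in ['education', 'psychology', 'counseling', 'behavioral']):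
--         return 'education'
--
--     # College of Liberal Arts
--     if any(term in department_lower for term in ['liberal arts', 'english', 'history', 'philosophy', 'sociology', 'political science']):
--         return 'liberal_arts'
--
--     # College of Sciences & Technology
--     if any(term in department_lower for term in ['science', 'technology', 'computer', 'engineering', 'biology', 'chemistry', 'physics', 'mathematics', 'math']):
--         return 'sciences'
--
--     # Department of Nursing
--     if 'nursing' in department_lower:
--         return 'nursing'
--
--     return None
-- ===== SOURCE B (Python) =====
-- # Flat (term, code) pairs in REVERSE priority order: a single overwrite loop
-- # (no early return, no per-group any()); the last matching write wins, i.e. the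
-- # highest-priority group.
-- _REVERSED_RULES = [
--     ('nursing', 'nursing'),
--     ('science', 'sciences'), ('technology', 'sciences'), ('computer', 'sciences'),
--     ('engineering', 'sciences'), ('biology', 'sciences'), ('chemistry', 'sciences'),
--     ('physics', 'sciences'), ('mathematics', 'sciences'), ('math', 'sciences'),
--     ('liberal arts', 'liberal_arts'), ('english', 'liberal_arts'), ('history', 'liberal_arts'),
--     ('philosophy', 'liberal_arts'), ('sociology', 'liberal_arts'), ('political science', 'liberal_arts'),
--     ('education', 'education'), ('psychology', 'education'), ('counseling', 'education'),
--     ('behavioral', 'education'),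
--     ('business', 'business'), ('accounting', 'business'), ('finance', 'business'),
--     ('marketing', 'business'), ('management', 'business'), ('economics', 'business'),
-- ]
--
-- def get_college_from_department(department):
--     if not department:
--         return None
--     department_lower = department.lower()
--     result = None
--     for term, code in _REVERSED_RULES:
--         if term in department_lower:
--             result = code
--     return result
-- ===== Notes on version B (the rewrite author's own statement) =====
-- stated objective: alternative
-- what changed: Replaced the five sequential any()-guarded early-return branches by one flat pass over all (term, code) pairs in reverse priority order with a last-write-wins accumulator and no early return.
import Mathlib
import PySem

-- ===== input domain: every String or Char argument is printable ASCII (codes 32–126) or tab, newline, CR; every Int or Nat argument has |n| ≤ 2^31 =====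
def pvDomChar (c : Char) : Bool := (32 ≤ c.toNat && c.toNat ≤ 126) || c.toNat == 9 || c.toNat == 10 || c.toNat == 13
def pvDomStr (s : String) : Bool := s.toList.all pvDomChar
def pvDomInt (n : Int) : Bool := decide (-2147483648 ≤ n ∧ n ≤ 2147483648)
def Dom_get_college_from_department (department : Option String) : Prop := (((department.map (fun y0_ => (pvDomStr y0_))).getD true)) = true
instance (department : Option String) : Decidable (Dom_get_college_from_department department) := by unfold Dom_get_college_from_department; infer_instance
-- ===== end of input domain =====

-- B replaces A's five any()-guarded early-return branches by one flat overwrite loop over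
-- (term, code) pairs in reverse priority order (alternative decomposition, same cost).


-- ===== PORT A =====
def get_college_from_department (department : Option String) : Option String :=
  match department with
  | none => none
  | some d =>
    if d = "" then none
    else
      let dl := PySem.Str.lower d
      if ["business", "accounting", "finance", "marketing", "management", "economics"].any
          (fun t => PySem.Str.isIn t dl) then some "business"
      else if ["education", "psychology", "counseling", "behavioral"].any
          (fun t => PySem.Str.isIn t dl) then some "education"
      else if ["liberal arts", "english", "history", "philosophy", "sociology", "political science"].any
          (fun t => PySem.Str.isIn t dl) then some "liberal_arts"
      else if ["science", "technology", "computer", "engineering", "biology", "chemistry",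
               "physics", "mathematics", "math"].any
          (fun t => PySem.Str.isIn t dl) then some "sciences"
      else if PySem.Str.isIn "nursing" dl then some "nursing"
      else none

-- ===== PORT B =====
-- flat (term, code) pairs in REVERSE priority order; last matching write wins
def pvReversedRules : List (String × String) :=
  [("nursing", "nursing"),
   ("science", "sciences"), ("technology", "sciences"), ("computer", "sciences"),
   ("engineering", "sciences"), ("biology", "sciences"), ("chemistry", "sciences"),
   ("physics", "sciences"), ("mathematics", "sciences"), ("math", "sciences"),
   ("liberal arts", "liberal_arts"), ("english", "liberal_arts"), ("history", "liberal_arts"),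
   ("philosophy", "liberal_arts"), ("sociology", "liberal_arts"), ("political science", "liberal_arts"),
   ("education", "education"), ("psychology", "education"), ("counseling", "education"),
   ("behavioral", "education"),
   ("business", "business"), ("accounting", "business"), ("finance", "business"),
   ("marketing", "business"), ("management", "business"), ("economics", "business")]

def get_college_from_department_alt (department : Option String) : Option String :=
  match department with
  | none => none
  | some d =>
    if d = "" then none
    else
      let dl := PySem.Str.lower d
      pvReversedRules.foldl
        (fun result tc => if PySem.Str.isIn tc.1 dl then some tc.2 else result) none

-- ===== PRECONDITION & SPEC =====
def Spec_get_college_from_department (department : Option String) (out : Option String) : Prop := out = get_college_from_department_alt department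
instance (department : Option String) (out : Option String) : Decidable (Spec_get_college_from_department department out) := by unfold Spec_get_college_from_department; infer_instance

-- ===== CLAIM (what is proved, stated in full; the proofs are below) =====
def Claim_equal_get_college_from_department : Prop := ∀ (department : Option String), Dom_get_college_from_department department → Spec_get_college_from_department department (get_college_from_department department)

-- ===== LEMMAS AND PROOFS =====

-- an overwrite fold over a segment whose codes are all `c` yields `some c` iff some term matches
theorem foldl_overwrite_const (p : String × String → Bool) (seg : List (String × String)) (c : String)
    (h : ∀ x ∈ seg, x.2 = c) (acc : Option String) :
    seg.foldl (fun result tc => if p tc then some tc.2 else result) acc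
      = if seg.any p then some c else acc := by
  induction seg generalizing acc with
  | nil => simp
  | cons hd tl ih =>
    have hc : hd.2 = c := h hd (List.mem_cons_self)
    have htl : ∀ x ∈ tl, x.2 = c := fun x hx => h x (List.mem_cons_of_mem _ hx)
    simp only [List.foldl_cons, List.any_cons, ih htl]
    rw [hc]
    by_cases hm : p hd = true <;> by_cases ha : tl.any p = true <;> simp [hm, ha]

theorem gcfd_eq (department : Option String) :
    get_college_from_department department = get_college_from_department_alt department := by
  match department with
  | none => rfl
  | some d =>
    unfold get_college_from_department get_college_from_department_alt
    by_cases hd : d = ""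
    · simp [hd]
    · simp only [hd, if_false]
      rw [show pvReversedRules =
        [("nursing", "nursing")] ++
        ([("science", "sciences"), ("technology", "sciences"), ("computer", "sciences"),
          ("engineering", "sciences"), ("biology", "sciences"), ("chemistry", "sciences"),
          ("physics", "sciences"), ("mathematics", "sciences"), ("math", "sciences")] ++
        ([("liberal arts", "liberal_arts"), ("english", "liberal_arts"), ("history", "liberal_arts"),
          ("philosophy", "liberal_arts"), ("sociology", "liberal_arts"), ("political science", "liberal_arts")] ++
        ([("education", "education"), ("psychology", "education"), ("counseling", "education"),
          ("behavioral", "education")] ++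
         [("business", "business"), ("accounting", "business"), ("finance", "business"),
          ("marketing", "business"), ("management", "business"), ("economics", "business")])))
        from rfl]
      rw [List.foldl_append, List.foldl_append, List.foldl_append, List.foldl_append]
      rw [foldl_overwrite_const _ _ "business" (by decide),
          foldl_overwrite_const _ _ "education" (by decide),
          foldl_overwrite_const _ _ "liberal_arts" (by decide),
          foldl_overwrite_const _ _ "sciences" (by decide),
          foldl_overwrite_const _ _ "nursing" (by decide)]
      simp only [List.any_cons, List.any_nil, Bool.or_false]

-- ===== VERDICT (by name: the statement is the Claim_ definition above) =====
theorem get_college_from_department_spec : Claim_equal_get_college_from_department := by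
  intro department _
  exact gcfd_eq department
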